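-- pv_equiv track=rewrite | github.com/astroupia/codeforces-solutions | Challenging Valleys.py | is_valley
-- ===== SOURCE A (Python) =====
-- def is_valley(arr):
--     n = len(arr)
--     left = 0
--     right = n - 1
--
--     # Find the left boundary of the potential valley
--     while left < n - 1 and arr[left] >= arr[left + 1]:
--         left += 1
--
--     # Find the right boundary of the potential valley
--     while right > 0 and arr[right] >= arr[right - 1]:
--         right -= 1
--
--     # Check if there's only one flat bottom between left and right
--     return left >= right or all(arr[i] == arr[left] for i in range(left, right + 1))
-- ===== SOURCE B (Python) =====
-- def is_valley(arr):
--     going_up = False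
--     for x, y in zip(arr, arr[1:]):
--         if x < y:
--             going_up = True
--         elif x > y and going_up:
--             return False
--     return True
-- ===== Notes on version B (the rewrite author's own statement) =====
-- stated objective: simpler
-- what changed: Replaced A's two boundary index scans plus a flat-plateau all() check by one forward sweep over consecutive pairs that tracks a going_up flag and fails on a descent after an ascent.
import Mathlib
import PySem

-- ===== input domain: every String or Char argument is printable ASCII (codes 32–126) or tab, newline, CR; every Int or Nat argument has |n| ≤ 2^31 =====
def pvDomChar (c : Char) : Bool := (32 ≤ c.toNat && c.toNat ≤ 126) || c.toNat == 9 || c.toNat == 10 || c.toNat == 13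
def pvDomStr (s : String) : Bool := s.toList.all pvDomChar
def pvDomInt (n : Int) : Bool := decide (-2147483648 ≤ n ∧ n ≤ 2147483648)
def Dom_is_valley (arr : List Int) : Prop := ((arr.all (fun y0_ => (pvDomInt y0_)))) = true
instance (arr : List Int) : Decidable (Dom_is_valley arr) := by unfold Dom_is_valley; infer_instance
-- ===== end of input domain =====

-- B replaces A's two boundary scans + plateau check by one going_up sweep over adjacent pairs (simpler; same O(n) cost).

-- ===== PORT A =====
-- while left < n - 1 and arr[left] >= arr[left + 1]: left += 1   (indices always in range when the guard holds)
def leftScan (arr : List Int) (left : Int) : Int :=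
  if _h : left < (arr.length : Int) - 1 ∧
      PySem.List.pyGetD arr (left + 1) 0 ≤ PySem.List.pyGetD arr left 0 then
    leftScan arr (left + 1)
  else left
termination_by ((arr.length : Int) - 1 - left).toNat
decreasing_by omega

-- while right > 0 and arr[right] >= arr[right - 1]: right -= 1
def rightScan (arr : List Int) (right : Int) : Int :=
  if _h : 0 < right ∧
      PySem.List.pyGetD arr (right - 1) 0 ≤ PySem.List.pyGetD arr right 0 then
    rightScan arr (right - 1)
  else right
termination_by right.toNat
decreasing_by omega

def is_valley (arr : List Int) : Bool :=
  let n : Int := arr.length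
  let left := leftScan arr 0
  let right := rightScan arr (n - 1)
  decide (right ≤ left) ||
    (PySem.List.pyRange left (right + 1) 1).all
      (fun i => decide (PySem.List.pyGetD arr i 0 = PySem.List.pyGetD arr left 0))

-- ===== PORT B =====
-- for x, y in zip(arr, arr[1:]): … with early return False
def altLoop : List Int → Bool → Bool
  | x :: y :: rest, up =>
      if x < y then altLoop (y :: rest) true
      else if x > y ∧ up then false
      else altLoop (y :: rest) up
  | _, _ => true

def is_valley_alt (arr : List Int) : Bool := altLoop arr false

-- ===== PRECONDITION & SPEC =====
def Spec_is_valley (arr : List Int) (out : Bool) : Prop := out = is_valley_alt arr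
instance (arr : List Int) (out : Bool) : Decidable (Spec_is_valley arr out) := by unfold Spec_is_valley; infer_instance

-- ===== CLAIM (what is proved, stated in full; the proofs are below) =====
def Claim_equal_is_valley : Prop := ∀ (arr : List Int), Dom_is_valley arr → Spec_is_valley arr (is_valley arr)

-- ===== LEMMAS AND PROOFS =====

-- strict ascent / descent of adjacent elements at Nat index i
def Asc (arr : List Int) (i : ℕ) : Prop := i + 1 < arr.length ∧ arr.getD i 0 < arr.getD (i+1) 0
def Dsc (arr : List Int) (i : ℕ) : Prop := i + 1 < arr.length ∧ arr.getD (i+1) 0 < arr.getD i 0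

theorem Asc_cons_succ (x : Int) (l : List Int) (j : ℕ) : Asc (x :: l) (j + 1) ↔ Asc l j := by
  unfold Asc
  simp only [List.length_cons, List.getD_cons_succ]
  constructor <;> rintro ⟨h1, h2⟩ <;> exact ⟨by omega, h2⟩

theorem Dsc_cons_succ (x : Int) (l : List Int) (j : ℕ) : Dsc (x :: l) (j + 1) ↔ Dsc l j := by
  unfold Dsc
  simp only [List.length_cons, List.getD_cons_succ]
  constructor <;> rintro ⟨h1, h2⟩ <;> exact ⟨by omega, h2⟩

theorem Asc_cons2_zero (x y : Int) (l : List Int) : Asc (x :: y :: l) 0 ↔ x < y := by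
  simp [Asc]

theorem Dsc_cons2_zero (x y : Int) (l : List Int) : Dsc (x :: y :: l) 0 ↔ y < x := by
  simp [Dsc]

theorem pyGetD_toNat (arr : List Int) (i : Int) (h : 0 ≤ i) :
    PySem.List.pyGetD arr i 0 = arr.getD i.toNat 0 := by
  lift i to ℕ using h with m
  simp [PySem.List.pyGetD_natCast]

-- characterisation of B's sweep: false iff some descent follows an ascent (or up already set)
theorem altLoop_false_iff : ∀ (arr : List Int) (up : Bool),
    altLoop arr up = false ↔ ∃ j, Dsc arr j ∧ (up = true ∨ ∃ i, i < j ∧ Asc arr i)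
  | [], up => by
      simp only [altLoop]
      constructor
      · intro h; simp at h
      · rintro ⟨j, hd, -⟩; exact absurd hd.1 (by simp)
  | [x], up => by
      simp only [altLoop]
      constructor
      · intro h; simp at h
      · rintro ⟨j, hd, -⟩; exact absurd hd.1 (by simp)
  | x :: y :: rest, up => by
      simp only [altLoop]
      by_cases hxy : x < y
      · rw [if_pos hxy, altLoop_false_iff (y :: rest) true]
        constructor
        · rintro ⟨j, hd, -⟩
          exact ⟨j + 1, (Dsc_cons_succ x _ j).mpr hd,
            Or.inr ⟨0, Nat.succ_pos j, (Asc_cons2_zero x y rest).mpr hxy⟩⟩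
        · rintro ⟨j, hd, -⟩
          cases j with
          | zero => exact absurd ((Dsc_cons2_zero x y rest).mp hd) (by omega)
          | succ j => exact ⟨j, (Dsc_cons_succ x _ j).mp hd, Or.inl rfl⟩
      · by_cases hgu : x > y ∧ up = true
        · rw [if_neg hxy, if_pos hgu]
          refine ⟨fun _ => ⟨0, (Dsc_cons2_zero x y rest).mpr hgu.1, Or.inl hgu.2⟩, fun _ => rfl⟩
        · rw [if_neg hxy, if_neg hgu, altLoop_false_iff (y :: rest) up]
          constructor
          · rintro ⟨j, hd, hc⟩
            refine ⟨j + 1, (Dsc_cons_succ x _ j).mpr hd, ?_⟩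
            rcases hc with h | ⟨i, hij, ha⟩
            · exact Or.inl h
            · exact Or.inr ⟨i + 1, by omega, (Asc_cons_succ x _ i).mpr ha⟩
          · rintro ⟨j, hd, hc⟩
            cases j with
            | zero =>
              exfalso
              have hyx : y < x := (Dsc_cons2_zero x y rest).mp hd
              rcases hc with h | ⟨i, hij, _⟩
              · exact hgu ⟨hyx, h⟩
              · omega
            | succ j =>
              refine ⟨j, (Dsc_cons_succ x _ j).mp hd, ?_⟩
              rcases hc with h | ⟨i, hij, ha⟩
              · exact Or.inl h
              · cases i with
                | zero => exact absurd ((Asc_cons2_zero x y rest).mp ha) hxy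
                | succ i => exact Or.inr ⟨i, by omega, (Asc_cons_succ x _ i).mp ha⟩

theorem leftScan_spec (arr : List Int) (left : Int) :
    left ≤ leftScan arr left ∧
    (∀ i : Int, left ≤ i → i < leftScan arr left →
      PySem.List.pyGetD arr (i + 1) 0 ≤ PySem.List.pyGetD arr i 0) ∧
    (leftScan arr left < (arr.length : Int) - 1 →
      PySem.List.pyGetD arr (leftScan arr left) 0 < PySem.List.pyGetD arr (leftScan arr left + 1) 0) := by
  induction left using leftScan.induct arr with
  | case1 left h ih =>
    rw [leftScan, dif_pos h]
    refine ⟨by omega, fun i h1 h2 => ?_, ih.2.2⟩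
    rcases eq_or_lt_of_le h1 with rfl | h1
    · exact h.2
    · exact ih.2.1 i (by omega) h2
  | case2 left h =>
    rw [leftScan, dif_neg h]
    push_neg at h
    exact ⟨le_refl _, fun i h1 h2 => by omega, fun hlt => h hlt⟩

theorem rightScan_spec (arr : List Int) (right : Int) :
    rightScan arr right ≤ right ∧
    (0 ≤ right → 0 ≤ rightScan arr right) ∧
    (∀ i : Int, rightScan arr right < i → i ≤ right →
      PySem.List.pyGetD arr (i - 1) 0 ≤ PySem.List.pyGetD arr i 0) ∧
    (0 < rightScan arr right →
      PySem.List.pyGetD arr (rightScan arr right) 0 < PySem.List.pyGetD arr (rightScan arr right - 1) 0) := by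
  induction right using rightScan.induct arr with
  | case1 right h ih =>
    rw [rightScan, dif_pos h]
    refine ⟨by omega, fun _ => ih.2.1 (by omega), fun i h1 h2 => ?_, ih.2.2.2⟩
    rcases eq_or_lt_of_le h2 with rfl | h2
    · exact h.2
    · exact ih.2.2.1 i h1 (by omega)
  | case2 right h =>
    rw [rightScan, dif_neg h]
    push_neg at h
    exact ⟨le_refl _, fun h0 => h0, fun i h1 h2 => by omega, fun hlt => h hlt⟩

-- ===== VERDICT (by name: the statement is the Claim_ definition above) =====
theorem is_valley_spec : Claim_equal_is_valley := by
  intro arr _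
  unfold Spec_is_valley is_valley is_valley_alt
  obtain ⟨hL0, hLinv, hLstop⟩ := leftScan_spec arr 0
  obtain ⟨hRle, hR0, hRinv, hRstop⟩ := rightScan_spec arr ((arr.length : Int) - 1)
  by_cases hLR : rightScan arr ((arr.length : Int) - 1) ≤ leftScan arr 0
  · -- A returns true; show B's sweep also returns true
    cases hB : altLoop arr false with
    | true => simp [hLR]
    | false =>
      exfalso
      rw [altLoop_false_iff] at hB
      obtain ⟨j, ⟨hjlen, hjd⟩, hc⟩ := hB
      rcases hc with h | ⟨i, hij, hilen, hia⟩
      · exact absurd h (by simp)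
      -- ascent at i forces left boundary ≤ i; descent at j forces right boundary > j
      have hLi : leftScan arr 0 ≤ (i : Int) := by
        by_contra hcon
        push_neg at hcon
        have hm := hLinv i (by omega) hcon
        rw [show ((i : Int) + 1) = (((i + 1 : ℕ) : Int)) by push_cast; ring] at hm
        rw [PySem.List.pyGetD_natCast, PySem.List.pyGetD_natCast] at hm
        omega
      have hjR : (j : Int) < rightScan arr ((arr.length : Int) - 1) := by
        by_contra hcon
        push_neg at hcon
        have hm := hRinv ((j : Int) + 1) (by omega) (by omega)
        rw [show ((j : Int) + 1 - 1) = ((j : ℕ) : Int) by ring] at hm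
        rw [show ((j : Int) + 1) = (((j + 1 : ℕ) : Int)) by push_cast; ring] at hm
        rw [PySem.List.pyGetD_natCast, PySem.List.pyGetD_natCast] at hm
        omega
      omega
  · -- left < right: the stop conditions give an ascent at left and a descent at right-1
    push_neg at hLR
    have hL0' : (0 : Int) ≤ leftScan arr 0 := hL0
    have hRn : rightScan arr ((arr.length : Int) - 1) ≤ (arr.length : Int) - 1 := hRle
    have hasc := hLstop (by omega)
    have hdsc := hRstop (by omega)
    rw [pyGetD_toNat arr _ (by omega), pyGetD_toNat arr _ (by omega)] at hasc
    rw [pyGetD_toNat arr _ (by omega), pyGetD_toNat arr _ (by omega)] at hdsc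
    have hLR1 : leftScan arr 0 < rightScan arr ((arr.length : Int) - 1) - 1 := by
      rcases eq_or_lt_of_le (by omega : leftScan arr 0 ≤ rightScan arr ((arr.length : Int) - 1) - 1) with heq | h
      · exfalso
        have h1 : (leftScan arr 0 + 1).toNat = (rightScan arr ((arr.length : Int) - 1)).toNat := by omega
        have h2 : (rightScan arr ((arr.length : Int) - 1) - 1).toNat = (leftScan arr 0).toNat := by omega
        rw [h1] at hasc; rw [h2] at hdsc; omega
      · exact h
    have hBfalse : altLoop arr false = false := by
      rw [altLoop_false_iff]
      refine ⟨(rightScan arr ((arr.length : Int) - 1) - 1).toNat, ⟨by omega, ?_⟩,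
        Or.inr ⟨(leftScan arr 0).toNat, by omega, by omega, ?_⟩⟩
      · rw [show (rightScan arr ((arr.length : Int) - 1) - 1).toNat + 1
              = (rightScan arr ((arr.length : Int) - 1)).toNat by omega]
        exact hdsc
      · rw [show (leftScan arr 0).toNat + 1 = (leftScan arr 0 + 1).toNat by omega]
        exact hasc
    rw [hBfalse]
    simp only [Bool.or_eq_false_iff, decide_eq_false_iff_not, not_le]
    refine ⟨hLR, ?_⟩
    rw [List.all_eq_false]
    refine ⟨leftScan arr 0 + 1, ?_, ?_⟩
    · rw [PySem.List.mem_pyRange_one]; omega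
    · rw [pyGetD_toNat arr _ (by omega), pyGetD_toNat arr _ (by omega)]
      simp only [decide_eq_true_eq]
      omega
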